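-- pv_equiv track=rewrite | github.com/evan42mr/readPdf_pycharm | read_pdf_numbers.py | extract_content_table
-- ===== SOURCE A (Python) =====
-- def extract_content_table(text):
--     # Number of the line where table of contents ends
--     tab_end_line = 0
--     # Flag for the start of the table of contents
--     tabStart = False
--     # Flag for the end of the table of contents
--     tabEnd = False
--     # Count lines after expected end of the table of contents
--     cnt_lines_after_expected_end = 0
--
--     lst_idx_tab = []
--
--     line_counter = 0
--     for i, line in enumerate(text.splitlines()):
--
--         line_counter += 1
--
--         found_content_item = line.find('..........')
--
--         if not tabEnd and found_content_item != -1: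
--             tab_end_line = i
--
--             if not tabStart:
--                 tabStart = True
--
--             lst_idx_tab.append(line[:found_content_item])
--             cnt_lines_after_expected_end = 0
--
--         if tabStart and not tabEnd and found_content_item == -1:
--             cnt_lines_after_expected_end += 1
--             if cnt_lines_after_expected_end > 20:
--                 tabEnd = True
--                 break
--
--     return lst_idx_tab, tab_end_line
-- ===== SOURCE B (Python) =====
-- def extract_content_table(text):
--     marker = '..........'
--     # Pass 1: index all matching lines as (line_no, prefix).
--     matches = []
--     for i, line in enumerate(text.splitlines()):
--         idx = line.find(marker)
--         if idx != -1:
--             matches.append((i, line[:idx]))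
--     if not matches:
--         return [], 0
--     # Pass 2: keep matches until the gap between consecutive match lines exceeds 21.
--     first_i, first_p = matches[0]
--     entries = [first_p]
--     last = first_i
--     for i, p in matches[1:]:
--         if i - last > 21:
--             break
--         entries.append(p)
--         last = i
--     return entries, last
-- ===== Notes on version B (the rewrite author's own statement) =====
-- stated objective: alternative
-- what changed: Replaces A's flag/counter state machine over all lines with a two-phase decomposition: first index all lines containing the dotted marker as (line_no, prefix) pairs, then scan that match list keeping entries while the gap between consecutive match line numbers is at most 21.
import Mathlib
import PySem

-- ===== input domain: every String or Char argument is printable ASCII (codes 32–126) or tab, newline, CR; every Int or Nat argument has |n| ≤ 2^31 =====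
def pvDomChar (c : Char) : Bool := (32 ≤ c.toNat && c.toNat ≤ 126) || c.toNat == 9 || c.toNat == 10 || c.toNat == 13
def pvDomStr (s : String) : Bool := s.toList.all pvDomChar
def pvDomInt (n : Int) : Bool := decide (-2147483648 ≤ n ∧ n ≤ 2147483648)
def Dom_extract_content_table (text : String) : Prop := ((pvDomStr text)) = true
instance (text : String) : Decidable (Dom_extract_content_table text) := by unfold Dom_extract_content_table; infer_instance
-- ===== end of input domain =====

-- B replaces A's flag/counter state machine with a two-phase decomposition (index the
-- matching lines, then scan gaps between consecutive match indices); same cost, no speed claim.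

-- ===== PORT A =====
-- A's loop, transliterated: the two sequential ifs are mutually exclusive (the second
-- requires found == -1, the first found != -1), so they are written as one if/else chain;
-- the unused local line_counter is dead state and is omitted; 'break' returns directly
-- (after the break nothing further mutates the result). i is the enumerate index.
def extractA_loop : List String → Int → Int → Bool → Bool → Int → List String → List String × Int
  | [], _, tab_end, _, _, _, lst => (lst, tab_end)
  | line :: rest, i, tab_end, tabStart, tabEnd, cnt, lst =>
    let found := PySem.Str.find line ".........."
    if !tabEnd && decide (found ≠ -1) then
      -- tab_end_line := i; tabStart := true; append line[:found]; cnt := 0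
      extractA_loop rest (i + 1) i true tabEnd 0 (lst ++ [PySem.Str.slice line none (some found)])
    else if tabStart && !tabEnd && decide (found = -1) then
      if cnt + 1 > 20 then (lst, tab_end)  -- tabEnd := true; break
      else extractA_loop rest (i + 1) tab_end tabStart tabEnd (cnt + 1) lst
    else extractA_loop rest (i + 1) tab_end tabStart tabEnd cnt lst

def extract_content_table (text : String) : List String × Int :=
  extractA_loop (PySem.Str.splitlines text) 0 0 false false 0 []

-- ===== PORT B =====
-- Pass 1 of Source B: collect (line_no, prefix) for every line containing the marker.
def extractB_matches : List String → Int → List (Int × String)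
  | [], _ => []
  | line :: rest, i =>
    let idx := PySem.Str.find line ".........."
    if idx = -1 then extractB_matches rest (i + 1)
    else (i, PySem.Str.slice line none (some idx)) :: extractB_matches rest (i + 1)

-- Pass 2 of Source B: keep entries while the gap between consecutive match indices is ≤ 21.
def extractB_follow : List (Int × String) → Int → List String → List String × Int
  | [], last, entries => (entries, last)
  | (i, p) :: rest, last, entries =>
    if i - last > 21 then (entries, last)
    else extractB_follow rest i (entries ++ [p])

def extract_content_table_alt (text : String) : List String × Int :=
  match extractB_matches (PySem.Str.splitlines text) 0 with
  | [] => ([], 0)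
  | (i, p) :: rest => extractB_follow rest i [p]

-- ===== PRECONDITION & SPEC =====
def Spec_extract_content_table (text : String) (out : List String × Int) : Prop := out = extract_content_table_alt text
instance (text : String) (out : List String × Int) : Decidable (Spec_extract_content_table text out) := by unfold Spec_extract_content_table; infer_instance

-- ===== CLAIM (what is proved, stated in full; the proofs are below) =====
def Claim_equal_extract_content_table : Prop := ∀ (text : String), Dom_extract_content_table text → Spec_extract_content_table text (extract_content_table text)

-- ===== LEMMAS AND PROOFS =====

-- Every match produced from start index i has line number ≥ i.
theorem extractB_matches_ge (ls : List String) (i : Int) :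
    ∀ p ∈ extractB_matches ls i, i ≤ p.1 := by
  induction ls generalizing i with
  | nil => simp [extractB_matches]
  | cons line rest ih =>
    intro p hp
    simp only [extractB_matches] at hp
    split at hp
    · have := ih (i + 1) p hp; omega
    · simp only [List.mem_cons] at hp
      rcases hp with rfl | h
      · simp
      · have := ih (i + 1) p h; omega

-- Started-state invariant: with tabStart on, cnt = c ≤ 20 and current index last+1+c,
-- A's loop agrees with B's gap scan over the remaining matches.
theorem loop_started (ls : List String) (last c : Int) (acc : List String)
    (hc : c ≤ 20) :
    extractA_loop ls (last + 1 + c) last true false c acc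
      = extractB_follow (extractB_matches ls (last + 1 + c)) last acc := by
  induction ls generalizing last c acc with
  | nil => simp [extractA_loop, extractB_matches, extractB_follow]
  | cons line rest ih =>
    simp only [extractA_loop, extractB_matches]
    by_cases hfound : PySem.Str.find line ".........." = -1
    · simp only [hfound]
      norm_num
      by_cases hbrk : 20 ≤ c
      · -- break: every remaining match has index ≥ last+2+c = last+22, so gap > 21
        rw [if_pos hbrk]
        cases hm : extractB_matches rest (last + 1 + c + 1) with
        | nil => simp [extractB_follow]
        | cons q qs =>
          have hq : last + 1 + c + 1 ≤ q.1 :=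
            extractB_matches_ge _ _ q (hm ▸ List.mem_cons_self ..)
          obtain ⟨j, p⟩ := q
          simp only [extractB_follow]
          rw [if_pos (by simp at hq; omega)]
      · rw [if_neg hbrk]
        have h2 : last + 1 + c + 1 = last + 1 + (c + 1) := by ring
        rw [h2, ih last (c + 1) acc (by omega)]
    · rw [if_pos (by simpa using hfound), if_neg hfound]
      simp only [extractB_follow]
      rw [if_neg (by omega)]
      have h2 : last + 1 + c + 1 = (last + 1 + c) + 1 + 0 := by ring
      rw [h2, ih (last + 1 + c) 0 (acc ++ [PySem.Str.slice line none (some (PySem.Str.find line ".........."))]) (by omega)]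

-- Pre-start phase: before any match, A skips lines; the first match hands over to loop_started.
theorem loop_prestart (ls : List String) (i : Int) :
    extractA_loop ls i 0 false false 0 []
      = match extractB_matches ls i with
        | [] => ([], 0)
        | (j, p) :: rest => extractB_follow rest j [p] := by
  induction ls generalizing i with
  | nil => simp [extractA_loop, extractB_matches]
  | cons line rest ih =>
    simp only [extractA_loop, extractB_matches]
    by_cases hfound : PySem.Str.find line ".........." = -1
    · simp only [hfound]
      norm_num
      exact ih (i + 1)
    · rw [if_pos (by simpa using hfound), if_neg hfound]
      have h2 : i + 1 = i + 1 + 0 := by ring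
      rw [h2, loop_started rest i 0 ([] ++ [PySem.Str.slice line none (some (PySem.Str.find line ".........."))]) (by omega)]
      simp

-- ===== VERDICT (by name: the statement is the Claim_ definition above) =====
theorem extract_content_table_spec : Claim_equal_extract_content_table := by
  intro text _
  unfold Spec_extract_content_table extract_content_table extract_content_table_alt
  exact loop_prestart (PySem.Str.splitlines text) 0
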